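-- pv_equiv track=rewrite | github.com/Marco1704/olympics_data_analysis | file_folder_services/file_name_cleaner.py | get_clean_file_names
-- ===== SOURCE A (Python) =====
-- def get_clean_file_names(
--         file_names: list) -> list:
--     clean_file_names = \
--         []
--
--     for file_name in file_names:
--         clean_file_name = file_name.lower().strip().replace(" ", "_").replace("?", "").replace("-", "_"). \
--             replace(r"/", "_").replace("\\", "_").replace("&", "").replace(")", "").replace(r"(", "").replace("$", "")
--
--         clean_file_names.append(
--             clean_file_name)
--
--     return \
--         clean_file_names
-- ===== SOURCE B (Python) =====
-- _MAP = {" ": "_", "?": "", "-": "_", "/": "_", "\\": "_", "&": "", ")": "", "(": "", "$": ""}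
--
-- def get_clean_file_names(file_names: list) -> list:
--     return ["".join(_MAP.get(ch, ch) for ch in name.lower().strip())
--             for name in file_names]
-- ===== Notes on version B (the rewrite author's own statement) =====
-- stated objective: idiomatic
-- what changed: Replaces the chain of ten sequential .replace() scans per name with a single character-by-character pass driven by a lookup table, building each cleaned name in one traversal.
import Mathlib
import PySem

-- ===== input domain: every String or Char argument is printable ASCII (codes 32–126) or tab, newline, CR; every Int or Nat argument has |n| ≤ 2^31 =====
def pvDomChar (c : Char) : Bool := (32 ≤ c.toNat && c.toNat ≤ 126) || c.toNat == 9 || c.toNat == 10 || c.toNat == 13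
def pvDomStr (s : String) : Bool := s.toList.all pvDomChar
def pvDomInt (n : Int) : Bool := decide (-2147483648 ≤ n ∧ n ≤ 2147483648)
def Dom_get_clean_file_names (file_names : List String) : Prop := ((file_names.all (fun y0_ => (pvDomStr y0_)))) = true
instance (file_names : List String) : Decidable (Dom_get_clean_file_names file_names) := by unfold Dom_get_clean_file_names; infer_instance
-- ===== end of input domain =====

-- B replaces A's chain of ten sequential .replace() scans per name with one
-- table-driven character pass (idiomatic; return value only, no mutation involved).

-- ===== PORT A =====
-- the chained lower().strip().replace(...)... of A, step for step
def pvCleanA (file_name : String) : String :=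
  PySem.Str.replace (PySem.Str.replace (PySem.Str.replace (PySem.Str.replace
    (PySem.Str.replace (PySem.Str.replace (PySem.Str.replace (PySem.Str.replace
      (PySem.Str.replace (PySem.Str.strip (PySem.Str.lower file_name)) " " "_")
      "?" "") "-" "_") "/" "_") "\\" "_") "&" "") ")" "") "(" "") "$" ""

def get_clean_file_names (file_names : List String) : List String :=
  file_names.foldl (fun clean_file_names file_name =>
    clean_file_names ++ [pvCleanA file_name]) []

-- ===== PORT B =====
-- the module-level replacement table _MAP of Source B
def pvMapB : PySem.Dict Char String :=
  PySem.Dict.mk [(' ', "_"), ('?', ""), ('-', "_"), ('/', "_"),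
                 ('\\', "_"), ('&', ""), (')', ""), ('(', ""), ('$', "")]

-- "".join(_MAP.get(ch, ch) for ch in name.lower().strip())
def pvCleanB (name : String) : String :=
  PySem.Str.join ""
    ((PySem.Str.strip (PySem.Str.lower name)).toList.map
      (fun ch => PySem.Dict.getD pvMapB ch (String.ofList [ch])))

def get_clean_file_names_alt (file_names : List String) : List String :=
  file_names.map pvCleanB

-- ===== PRECONDITION & SPEC =====
def Spec_get_clean_file_names (file_names : List String) (out : List String) : Prop := out = get_clean_file_names_alt file_names
instance (file_names : List String) (out : List String) : Decidable (Spec_get_clean_file_names file_names out) := by unfold Spec_get_clean_file_names; infer_instance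

-- ===== CLAIM (what is proved, stated in full; the proofs are below) =====
def Claim_equal_get_clean_file_names : Prop := ∀ (file_names : List String), Dom_get_clean_file_names file_names → Spec_get_clean_file_names file_names (get_clean_file_names file_names)

-- ===== LEMMAS AND PROOFS =====

-- single-character replacement: Python's s.replace(o, new) with |o| = 1 is a per-character flatMap
def repFun (o : Char) (new : List Char) : Char → List Char :=
  fun c => if c = o then new else [c]

theorem replace_single (o : Char) (new : List Char) (s : List Char) :
    PySem.Chars.replace s [o] new = s.flatMap (repFun o new) := by
  have go1 : ∀ fuel l acc, l.length ≤ fuel →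
      PySem.Chars.replace.go [o] new fuel l acc
        = acc.reverse ++ l.flatMap (repFun o new) := by
    intro fuel
    induction fuel with
    | zero =>
      intro l acc h
      have : l = [] := List.eq_nil_of_length_eq_zero (Nat.le_zero.mp h)
      subst this; simp [PySem.Chars.replace.go]
    | succ n ih =>
      intro l acc h
      cases l with
      | nil => simp [PySem.Chars.replace.go]
      | cons c t =>
        simp only [PySem.Chars.replace.go]
        by_cases hc : c = o
        · subst hc
          rw [if_pos (by simp [List.isPrefixOf])]
          have := ih t (new.reverse ++ acc) (by simpa using h)
          simp only [List.length_cons, List.drop_succ_cons, List.length_nil, List.drop_zero] at *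
          rw [this]
          simp [repFun]
        · rw [if_neg (by simp [List.isPrefixOf]; exact fun h' => hc h'.symm)]
          rw [ih t _ (by simpa using h)]
          simp [repFun, hc]
  simp only [PySem.Chars.replace, List.isEmpty_cons, Bool.false_eq_true, if_false]
  exact go1 s.length s [] le_rfl

-- "".join = flatten
theorem join_nil_sep (parts : List (List Char)) :
    PySem.Chars.join "".toList parts = parts.flatten := by
  simp only [PySem.Chars.join, List.intercalate, String.toList_empty]
  induction parts with
  | nil => simp
  | cons x xs ih => cases xs <;> simp_all [List.intersperse]

-- the two per-name cleaners agree
theorem clean_eq (s : String) : pvCleanA s = pvCleanB s := by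
  rw [← String.toList_inj]
  simp only [pvCleanA, pvCleanB, PySem.Str.toList_replace, PySem.Str.toList_join,
    PySem.Str.toList_strip, PySem.Str.toList_lower]
  generalize (PySem.Chars.strip (PySem.Chars.lower s.toList)) = t
  have hrep : ∀ (o : Char) (new : String) (l : List Char),
      PySem.Chars.replace l (String.ofList [o]).toList new.toList
        = l.flatMap (repFun o new.toList) := by
    intro o new l
    have : (String.ofList [o]).toList = [o] := by simp
    rw [this, replace_single]
  simp only [show (" " : String) = String.ofList [' '] from rfl,
    show ("?" : String) = String.ofList ['?'] from rfl,
    show ("-" : String) = String.ofList ['-'] from rfl,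
    show ("/" : String) = String.ofList ['/'] from rfl,
    show ("\\" : String) = String.ofList ['\\'] from rfl,
    show ("&" : String) = String.ofList ['&'] from rfl,
    show (")" : String) = String.ofList [')'] from rfl,
    show ("(" : String) = String.ofList ['('] from rfl,
    show ("$" : String) = String.ofList ['$'] from rfl]
  simp only [hrep, List.flatMap_assoc]
  rw [join_nil_sep]
  simp only [List.map_map]
  rw [List.flatten_eq_flatMap]
  induction t with
  | nil => simp
  | cons c t ih =>
    simp only [List.flatMap_cons, ih]
    congr 1
    simp only [repFun, Function.comp, pvMapB, PySem.Dict.getD, PySem.Dict.get?,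
      List.find?]
    by_cases h1 : c = ' '; · subst h1; rfl
    by_cases h2 : c = '?'; · subst h2; rfl
    by_cases h3 : c = '-'; · subst h3; rfl
    by_cases h4 : c = '/'; · subst h4; rfl
    by_cases h5 : c = '\\'; · subst h5; rfl
    by_cases h6 : c = '&'; · subst h6; rfl
    by_cases h7 : c = ')'; · subst h7; rfl
    by_cases h8 : c = '('; · subst h8; rfl
    by_cases h9 : c = '$'; · subst h9; rfl
    have e1 : (' ' == c) = false := beq_eq_false_iff_ne.mpr (Ne.symm h1)
    have e2 : ('?' == c) = false := beq_eq_false_iff_ne.mpr (Ne.symm h2)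
    have e3 : ('-' == c) = false := beq_eq_false_iff_ne.mpr (Ne.symm h3)
    have e4 : ('/' == c) = false := beq_eq_false_iff_ne.mpr (Ne.symm h4)
    have e5 : ('\\' == c) = false := beq_eq_false_iff_ne.mpr (Ne.symm h5)
    have e6 : ('&' == c) = false := beq_eq_false_iff_ne.mpr (Ne.symm h6)
    have e7 : (')' == c) = false := beq_eq_false_iff_ne.mpr (Ne.symm h7)
    have e8 : ('(' == c) = false := beq_eq_false_iff_ne.mpr (Ne.symm h8)
    have e9 : ('$' == c) = false := beq_eq_false_iff_ne.mpr (Ne.symm h9)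
    simp [repFun, h1, h2, h3, h4, h5, h6, h7, h8, h9,
      e1, e2, e3, e4, e5, e6, e7, e8, e9]

-- A's append-loop builds the map
theorem foldl_append_map (l acc : List String) :
    l.foldl (fun out s => out ++ [pvCleanA s]) acc = acc ++ l.map pvCleanA := by
  induction l generalizing acc with
  | nil => simp
  | cons x xs ih => simp [ih]

-- ===== VERDICT (by name: the statement is the Claim_ definition above) =====
theorem get_clean_file_names_spec : Claim_equal_get_clean_file_names := by
  intro file_names _
  unfold Spec_get_clean_file_names get_clean_file_names get_clean_file_names_alt
  rw [foldl_append_map]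
  simp [clean_eq]
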